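-- pv_equiv track=rewrite | github.com/aabishkaryal/dot | .agents/skills/use-railway/scripts/analyze-mysql.py | _split_mysql_resultsets
-- ===== SOURCE A (Python) =====
-- from typing import Any, Dict, List, Optional, Tuple
--
-- def _split_mysql_resultsets(output: str, header_key: str) -> List[str]:
--     """Split concatenated MySQL batch output into sections by header line."""
--     lines = output.strip().split("\n")
--     sections: List[List[str]] = []
--     current: List[str] = []
--
--     for line in lines:
--         if line.startswith(header_key + "\t") or line.strip() == header_key:
--             if current:
--                 sections.append("\n".join(current))
--             current = [line]
--         else:
--             current.append(line)
--     if current: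
--         sections.append("\n".join(current))
--
--     return sections
-- ===== SOURCE B (Python) =====
-- def _split_mysql_resultsets(output: str, header_key: str):
--     """Split concatenated MySQL batch output into sections by header line.
--
--     Cursor-based scan: from each section start i, an inner scan finds the
--     index j of the next header line (or end of input), and the section is
--     the slice lines[i:j] joined back; the cursor then jumps to j.  No
--     running accumulator or flush bookkeeping is needed.
--     """
--     lines = output.strip().split("\n")
--
--     def is_header(line):
--         return line.startswith(header_key + "\t") or line.strip() == header_key
--
--     sections = []
--     i, n = 0, len(lines)
--     while i < n:
--         j = i + 1
--         while j < n and not is_header(lines[j]):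
--             j += 1
--         sections.append("\n".join(lines[i:j]))
--         i = j
--     return sections
-- ===== Notes on version B (the rewrite author's own statement) =====
-- stated objective: alternative
-- what changed: Replaces A's accumulator loop that flushes the pending section whenever a header arrives (plus a trailing flush) with a two-cursor scan: from each section start an inner scan locates the next header index and the section is emitted as one joined slice lines[i:j].
import Mathlib
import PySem

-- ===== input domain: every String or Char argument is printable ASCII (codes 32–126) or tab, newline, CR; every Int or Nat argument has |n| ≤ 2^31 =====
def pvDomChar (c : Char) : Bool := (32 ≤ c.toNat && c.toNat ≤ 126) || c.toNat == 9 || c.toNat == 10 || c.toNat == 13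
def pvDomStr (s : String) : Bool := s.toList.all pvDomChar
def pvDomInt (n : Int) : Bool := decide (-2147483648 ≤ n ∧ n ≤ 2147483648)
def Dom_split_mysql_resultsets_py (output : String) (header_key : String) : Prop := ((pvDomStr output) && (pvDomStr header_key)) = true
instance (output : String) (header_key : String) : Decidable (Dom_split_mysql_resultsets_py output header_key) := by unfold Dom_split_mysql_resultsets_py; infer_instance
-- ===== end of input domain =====

-- B replaces A's flush-on-header accumulator loop by a two-cursor scan that finds each next
-- header index and emits sections as joined slices (objective: alternative decomposition,
-- same cost); return values proved equal on all inputs.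

-- ===== PORT A =====
-- shared header test, the identical Python expression in both versions:
-- `line.startswith(header_key + "\t") or line.strip() == header_key`
def pvIsHeader (header_key line : String) : Bool :=
  PySem.Str.startswith line (header_key ++ "\t") || (PySem.Str.strip line == header_key)

-- loop body of A: flush `current` to `sections` on a header, else extend `current`
def pvStepA (header_key : String) (st : List String × List String) (line : String) :
    List String × List String :=
  if pvIsHeader header_key line then
    ((if st.2 = [] then st.1 else st.1 ++ [PySem.Str.join "\n" st.2]), [line])
  else
    (st.1, st.2 ++ [line])

def split_mysql_resultsets_py (output : String) (header_key : String) : List String :=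
  let lines := (PySem.Str.split? (PySem.Str.strip output) "\n").getD []
  let st := lines.foldl (pvStepA header_key) ([], [])
  if st.2 = [] then st.1 else st.1 ++ [PySem.Str.join "\n" st.2]

-- ===== PORT B =====
-- inner while loop of B: advance j until a header line (or the end) is reached
-- (fuel-based structural recursion; fuel = lines.length always suffices, since the loop
-- stops once j reaches lines.length)
def pvScan (header_key : String) (lines : List String) : Nat → Nat → Nat
  | 0, j => j
  | fuel + 1, j =>
      if j < lines.length ∧ pvIsHeader header_key (lines.getD j "") = false then
        pvScan header_key lines fuel (j + 1)
      else j

-- outer while loop of B: from section start i, scan to the next header j, emit lines[i:j]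
-- (fuel = lines.length suffices: the cursor i strictly advances each iteration)
def pvOuter (header_key : String) (lines : List String) :
    Nat → Nat → List String → List String
  | 0, _, sections => sections
  | fuel + 1, i, sections =>
      if i < lines.length then
        let j := pvScan header_key lines lines.length (i + 1)
        pvOuter header_key lines fuel j
          (sections ++
            [PySem.Str.join "\n" (PySem.List.slice lines (some (i : Int)) (some (j : Int)))])
      else sections

def split_mysql_resultsets_py_alt (output : String) (header_key : String) : List String :=
  let lines := (PySem.Str.split? (PySem.Str.strip output) "\n").getD []
  pvOuter header_key lines lines.length 0 []

-- ===== PRECONDITION & SPEC =====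
def Spec_split_mysql_resultsets_py (output : String) (header_key : String) (out : List String) : Prop := out = split_mysql_resultsets_py_alt output header_key
instance (output : String) (header_key : String) (out : List String) : Decidable (Spec_split_mysql_resultsets_py output header_key out) := by unfold Spec_split_mysql_resultsets_py; infer_instance

-- ===== CLAIM (what is proved, stated in full; the proofs are below) =====
def Claim_equal_split_mysql_resultsets_py : Prop := ∀ (output : String) (header_key : String), Dom_split_mysql_resultsets_py output header_key → Spec_split_mysql_resultsets_py output header_key (split_mysql_resultsets_py output header_key)

-- ===== LEMMAS AND PROOFS =====

-- reference recursion both ports are reduced to: each section is its first line plus the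
-- following maximal run of non-header lines
def pvSpec (header_key : String) : List String → List String
  | [] => []
  | l :: ls =>
      PySem.Str.join "\n" (l :: ls.takeWhile (fun x => !pvIsHeader header_key x))
        :: pvSpec header_key (ls.dropWhile (fun x => !pvIsHeader header_key x))
termination_by ls => ls.length
decreasing_by
  simpa using Nat.lt_succ_of_le (List.length_dropWhile_le _ _)

theorem pvSpec_nil (header_key : String) : pvSpec header_key [] = [] := by
  rw [pvSpec]

theorem pvSpec_cons (header_key l : String) (ls : List String) :
    pvSpec header_key (l :: ls)
      = PySem.Str.join "\n" (l :: ls.takeWhile (fun x => !pvIsHeader header_key x))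
        :: pvSpec header_key (ls.dropWhile (fun x => !pvIsHeader header_key x)) := by
  rw [pvSpec]

theorem pv_take_takeWhile {α : Type} (p : α → Bool) (ls : List α) :
    ls.take (ls.takeWhile p).length = ls.takeWhile p := by
  induction ls with
  | nil => rfl
  | cons a t ih => by_cases h : p a <;> simp [h, ih]

theorem pv_drop_takeWhile {α : Type} (p : α → Bool) (ls : List α) :
    ls.drop (ls.takeWhile p).length = ls.dropWhile p := by
  induction ls with
  | nil => rfl
  | cons a t ih => by_cases h : p a <;> simp [h, ih]

-- the inner scan never moves the cursor backwards
theorem pvScan_ge (header_key : String) (lines : List String) (fuel j : Nat) :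
    j ≤ pvScan header_key lines fuel j := by
  induction fuel generalizing j with
  | zero => simp [pvScan]
  | succ fuel ih =>
      rw [pvScan]
      split
      · exact le_trans (Nat.le_succ j) (ih (j + 1))
      · exact le_refl j

-- with enough fuel, the inner scan returns the index of the first header at or after k
theorem pvScan_eq (header_key : String) (lines : List String) (fuel k : Nat)
    (hfuel : lines.length - k ≤ fuel) :
    pvScan header_key lines fuel k
      = k + ((lines.drop k).takeWhile (fun x => !pvIsHeader header_key x)).length := by
  induction fuel generalizing k with
  | zero =>
      have : lines.drop k = [] := List.drop_eq_nil_of_le (by omega)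
      simp [pvScan, this]
  | succ fuel ih =>
      rw [pvScan]
      by_cases hk : k < lines.length
      · have hdrop : lines.drop k = lines[k] :: lines.drop (k + 1) :=
          List.drop_eq_getElem_cons hk
        have hgetD : lines.getD k "" = lines[k] := List.getD_eq_getElem lines "" hk
        by_cases hh : pvIsHeader header_key lines[k] = false
        · have htw : (lines.drop k).takeWhile (fun x => !pvIsHeader header_key x)
              = lines[k] :: (lines.drop (k + 1)).takeWhile (fun x => !pvIsHeader header_key x) := by
            rw [hdrop, List.takeWhile_cons]
            simp [hh]
          rw [if_pos ⟨hk, by rw [hgetD]; exact hh⟩]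
          rw [ih (k + 1) (by omega), htw]
          simp
          omega
        · have htw : (lines.drop k).takeWhile (fun x => !pvIsHeader header_key x) = [] := by
            rw [hdrop, List.takeWhile_cons]
            simp only [Bool.not_eq_false] at hh
            simp [hh]
          rw [if_neg (by rw [hgetD]; tauto), htw]
          simp
      · rw [if_neg (by tauto)]
        simp [List.drop_eq_nil_of_le (le_of_not_gt hk)]

-- with enough fuel, B's outer loop computes pvSpec of the remaining suffix, appended to the
-- sections already emitted
theorem pvOuter_eq (header_key : String) (lines : List String) (fuel : Nat) :
    ∀ (i : Nat) (sections : List String), lines.length - i ≤ fuel →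
      pvOuter header_key lines fuel i sections
        = sections ++ pvSpec header_key (lines.drop i) := by
  induction fuel with
  | zero =>
      intro i sections hfuel
      have : lines.drop i = [] := List.drop_eq_nil_of_le (by omega)
      simp [pvOuter, this, pvSpec_nil]
  | succ fuel ih =>
      intro i sections hfuel
      rw [pvOuter]
      by_cases h : i < lines.length
      · rw [if_pos h]
        have hdrop : lines.drop i = lines[i] :: lines.drop (i + 1) :=
          List.drop_eq_getElem_cons h
        have hscan := pvScan_eq header_key lines lines.length (i + 1) (by omega)
        have hge := pvScan_ge header_key lines lines.length (i + 1)
        have hcast : ((i + 1 + ((lines.drop (i + 1)).takeWhile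
              (fun x => !pvIsHeader header_key x)).length : Nat) : Int)
            = ((i : Nat) : Int) + ((((lines.drop (i + 1)).takeWhile
              (fun x => !pvIsHeader header_key x)).length + 1 : Nat) : Int) := by
          push_cast; ring
        have hslice : PySem.List.slice lines (some (i : Int))
              (some ((pvScan header_key lines lines.length (i + 1) : Nat) : Int))
            = lines[i] :: (lines.drop (i + 1)).takeWhile (fun x => !pvIsHeader header_key x) := by
          rw [hscan, hcast, PySem.List.slice_natCast_add, hdrop, List.take_succ_cons,
            pv_take_takeWhile]
        have hrest : lines.drop (pvScan header_key lines lines.length (i + 1))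
            = (lines.drop (i + 1)).dropWhile (fun x => !pvIsHeader header_key x) := by
          rw [hscan, ← pv_drop_takeWhile (fun x => !pvIsHeader header_key x) (lines.drop (i + 1)),
            List.drop_drop]
        rw [ih (pvScan header_key lines lines.length (i + 1)) _ (by omega), hslice, hrest,
          hdrop, pvSpec_cons]
        simp
      · rw [if_neg h]
        simp [List.drop_eq_nil_of_le (le_of_not_gt h), pvSpec_nil]

-- A's fold, from any state with a nonempty pending section, closes that section at the next
-- header and continues as pvSpec
theorem pv_foldA_eq (header_key : String) (lines : List String) :
    ∀ (secs cur : List String), cur ≠ [] →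
      (let st := lines.foldl (pvStepA header_key) (secs, cur);
       if st.2 = [] then st.1 else st.1 ++ [PySem.Str.join "\n" st.2])
      = secs ++ PySem.Str.join "\n" (cur ++ lines.takeWhile (fun x => !pvIsHeader header_key x))
          :: pvSpec header_key (lines.dropWhile (fun x => !pvIsHeader header_key x)) := by
  induction lines with
  | nil => intro secs cur hcur; simp [hcur, pvSpec_nil]
  | cons l ls ih =>
      intro secs cur hcur
      by_cases hl : pvIsHeader header_key l = true
      · have hstep : pvStepA header_key (secs, cur) l
            = (secs ++ [PySem.Str.join "\n" cur], [l]) := by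
          simp [pvStepA, hl, hcur]
        rw [List.foldl_cons, hstep, ih (secs ++ [PySem.Str.join "\n" cur]) [l] (by simp),
          List.takeWhile_cons, List.dropWhile_cons]
        simp [hl, pvSpec_cons]
      · have hstep : pvStepA header_key (secs, cur) l = (secs, cur ++ [l]) := by
          simp [pvStepA, hl]
        rw [List.foldl_cons, hstep, ih secs (cur ++ [l]) (by simp),
          List.takeWhile_cons, List.dropWhile_cons]
        simp [hl]

theorem split_mysql_resultsets_py_eq (output header_key : String) :
    split_mysql_resultsets_py output header_key
      = split_mysql_resultsets_py_alt output header_key := by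
  simp only [split_mysql_resultsets_py, split_mysql_resultsets_py_alt]
  rw [pvOuter_eq header_key _ _ 0 [] (by omega)]
  cases hls : (PySem.Str.split? (PySem.Str.strip output) "\n").getD [] with
  | nil => simp [pvSpec_nil]
  | cons l ls =>
      have hstep : pvStepA header_key ([], []) l = ([], [l]) := by
        unfold pvStepA
        split <;> simp
      rw [List.foldl_cons, hstep, pv_foldA_eq header_key ls [] [l] (by simp), List.drop_zero, pvSpec_cons]
      simp

-- ===== VERDICT (by name: the statement is the Claim_ definition above) =====
theorem split_mysql_resultsets_py_spec : Claim_equal_split_mysql_resultsets_py := by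
  intro output header_key _
  unfold Spec_split_mysql_resultsets_py
  exact split_mysql_resultsets_py_eq output header_key
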